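-- pv_equiv track=rewrite | github.com/MrBrantCode/unitest_baseline | mut_generate/mist_train_cf/cf_54247/solution.py | five_nine_twelve
-- ===== SOURCE A (Python) =====
-- def five_nine_twelve(n: int):
--     """
--     Return the count of integers less than n, which contain the digit 5.
--     The returned count should include numbers that are:
--     - divisible by either 9 or 12.
--     - handle cases where n is negative.
--     """
--     count = 0
--     if n > 0:
--         for i in range(1,n):
--             if '5' in str(i) and (i % 12 == 0 or i % 9 == 0):
--                 count += 1
--     else:
--         for i in range(n+1,0):
--             if '5' in str(i) and (i % 12 == 0 or i % 9 == 0):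
--                 count += 1
--     return count
-- ===== SOURCE B (Python) =====
-- def five_nine_twelve(n: int):
--     m = abs(n)
--     c9 = sum(1 for i in range(9, m, 9) if '5' in str(i))
--     c12 = sum(1 for i in range(12, m, 12) if '5' in str(i))
--     c36 = sum(1 for i in range(36, m, 36) if '5' in str(i))
--     return c9 + c12 - c36
-- ===== Notes on version B (the rewrite author's own statement) =====
-- stated objective: faster
-- what changed: Instead of scanning every integer below |n| and testing divisibility, B enumerates only the multiples of 9, 12 and 36 with stepped ranges and combines the digit-5 counts by inclusion-exclusion, folding the negative case into abs(n).
import Mathlib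
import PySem

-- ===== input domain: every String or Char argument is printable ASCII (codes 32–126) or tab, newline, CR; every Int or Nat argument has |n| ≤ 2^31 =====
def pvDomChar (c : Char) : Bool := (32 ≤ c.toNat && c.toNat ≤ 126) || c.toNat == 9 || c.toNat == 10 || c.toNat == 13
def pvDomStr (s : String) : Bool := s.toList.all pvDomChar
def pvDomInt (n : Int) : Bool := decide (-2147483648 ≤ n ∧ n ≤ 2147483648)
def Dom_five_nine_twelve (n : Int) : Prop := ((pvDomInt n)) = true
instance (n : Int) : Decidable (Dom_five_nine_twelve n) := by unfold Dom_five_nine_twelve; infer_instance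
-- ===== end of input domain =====

-- B replaces A's scan of every integer below |n| by inclusion–exclusion over the
-- multiples of 9, 12 and 36 only (and folds the negative case into abs): same count,
-- about six times fewer loop iterations (objective: faster, constant factor).


-- ===== PORT A =====
-- '5' in str(i) and (i % 12 == 0 or i % 9 == 0)
def pvCondA (i : Int) : Bool :=
  PySem.Str.isIn "5" (PySem.Int.toStr i) && (PySem.Int.mod i 12 == 0 || PySem.Int.mod i 9 == 0)

def five_nine_twelve (n : Int) : Int :=
  if n > 0 then
    (PySem.List.pyRange 1 n 1).foldl (fun count i => if pvCondA i then count + 1 else count) 0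
  else
    (PySem.List.pyRange (n+1) 0 1).foldl (fun count i => if pvCondA i then count + 1 else count) 0

-- ===== PORT B =====
-- '5' in str(i)
def pvHas5 (i : Int) : Bool := PySem.Str.isIn "5" (PySem.Int.toStr i)

def five_nine_twelve_alt (n : Int) : Int :=
  let m : Int := (n.natAbs : Int)
  let c9 : Int := ((PySem.List.pyRange 9 m 9).countP pvHas5 : Int)
  let c12 : Int := ((PySem.List.pyRange 12 m 12).countP pvHas5 : Int)
  let c36 : Int := ((PySem.List.pyRange 36 m 36).countP pvHas5 : Int)
  c9 + c12 - c36

-- ===== PRECONDITION & SPEC =====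
def Spec_five_nine_twelve (n : Int) (out : Int) : Prop := out = five_nine_twelve_alt n
instance (n : Int) (out : Int) : Decidable (Spec_five_nine_twelve n out) := by unfold Spec_five_nine_twelve; infer_instance

-- ===== CLAIM (what is proved, stated in full; the proofs are below) =====
def Claim_equal_five_nine_twelve : Prop := ∀ (n : Int), Dom_five_nine_twelve n → Spec_five_nine_twelve n (five_nine_twelve n)

-- ===== LEMMAS AND PROOFS =====

-- a positive-step range is strictly increasing
lemma pv_pyRange_pairwise_lt (a b d : Int) (hd : 0 < d) :
    (PySem.List.pyRange a b d).Pairwise (· < ·) := by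
  rw [PySem.List.pyRange_of_pos a b hd]
  refine (List.pairwise_map).mpr ?_
  refine List.Pairwise.imp ?_ (List.pairwise_lt_range)
  intro i j hij
  have : (i : Int) < j := by exact_mod_cast hij
  nlinarith

-- the multiples of d in [1, m) listed by range(d, m, d) are the filter of range(1, m)
lemma pv_filter_dvd (d m : Int) (hd : 0 < d) :
    (PySem.List.pyRange 1 m 1).filter (fun i => decide (d ∣ i)) = PySem.List.pyRange d m d := by
  have h1 : ((PySem.List.pyRange 1 m 1).filter (fun i => decide (d ∣ i))).Pairwise (· < ·) :=
    (pv_pyRange_pairwise_lt 1 m 1 (by omega)).filter _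
  have h2 : (PySem.List.pyRange d m d).Pairwise (· < ·) := pv_pyRange_pairwise_lt d m d hd
  have hmem : ∀ x : Int,
      x ∈ (PySem.List.pyRange 1 m 1).filter (fun i => decide (d ∣ i)) ↔
      x ∈ PySem.List.pyRange d m d := by
    intro x
    simp only [List.mem_filter, PySem.List.mem_pyRange_one,
      PySem.List.mem_pyRange_iff_of_pos hd, decide_eq_true_eq]
    constructor
    · rintro ⟨⟨h1x, h2x⟩, hdvd⟩
      exact ⟨Int.le_of_dvd (by omega) hdvd, h2x, (dvd_sub_right hdvd).mpr dvd_rfl⟩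
    · rintro ⟨hle, hlt, hdvd⟩
      have hx : d ∣ x := by
        have h := dvd_add hdvd (dvd_refl d)
        simpa using h
      exact ⟨⟨by omega, hlt⟩, hx⟩
  have hperm : (PySem.List.pyRange d m d).Perm
      ((PySem.List.pyRange 1 m 1).filter (fun i => decide (d ∣ i))) :=
    (List.perm_ext_iff_of_nodup h2.nodup h1.nodup).mpr (fun x => (hmem x).symm)
  have e1 := PySem.List.sorted_eq_of_perm_of_pairwise_lt
      (PySem.List.pyRange d m d)
      ((PySem.List.pyRange 1 m 1).filter (fun i => decide (d ∣ i))) (fun x => x)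
      hperm.symm h1
  have e2 := PySem.List.sorted_eq_of_perm_of_pairwise_lt
      (PySem.List.pyRange d m d) (PySem.List.pyRange d m d) (fun x => x)
      (List.Perm.refl _) h2
  rw [← e1, e2]

-- inclusion–exclusion, element by element, over any list
lemma pv_countP_ie (l : List Int) :
    (l.countP pvCondA : Int)
      = (l.countP (fun i => pvHas5 i && decide (9 ∣ i)) : Int)
        + (l.countP (fun i => pvHas5 i && decide (12 ∣ i)) : Int)
        - (l.countP (fun i => pvHas5 i && decide (36 ∣ i)) : Int) := by
  induction l with
  | nil => simp
  | cons i l ih =>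
    have h36 : (36 : Int) ∣ i ↔ (9 ∣ i ∧ 12 ∣ i) := by omega
    simp only [List.countP_cons]
    push_cast
    have hc : pvCondA i = (pvHas5 i && (decide ((12:Int) ∣ i) || decide ((9:Int) ∣ i))) := by
      rw [Bool.eq_iff_iff]
      simp [pvCondA, pvHas5, PySem.Int.emod_eq_zero_iff_dvd]
    rw [hc]
    by_cases h5 : pvHas5 i = true <;>
      by_cases h9 : (9:Int) ∣ i <;> by_cases h12 : (12:Int) ∣ i <;>
      simp [h5, h9, h12, h36.mpr, (fun h => (h36.mp h)), *] <;> omega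

-- the negative branch counts the same values as the positive scan of |n|
lemma pv_has5_neg (j : Int) (hj : 0 < j) : pvHas5 (-j) = pvHas5 j := by
  have hneg : PySem.Int.toChars (-j) = '-' :: PySem.Int.toChars j := by
    unfold PySem.Int.toChars
    rw [if_pos (by omega : -j < 0), if_neg (by omega : ¬ j < 0)]
    congr 2
    omega
  rw [Bool.eq_iff_iff]
  simp only [pvHas5, PySem.Str.isIn_eq, PySem.Int.toList_toStr, hneg]
  have h : "5".toList = ['5'] := rfl
  rw [h, PySem.Chars.isIn_iff_infix, PySem.Chars.isIn_iff_infix,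
    List.singleton_infix_iff, List.singleton_infix_iff]
  simp

lemma pv_condA_neg (j : Int) (hj : 0 < j) : pvCondA (-j) = pvCondA j := by
  have h12 : (PySem.Int.mod (-j) 12 == 0) = (PySem.Int.mod j 12 == 0) := by
    rw [Bool.eq_iff_iff]
    simp only [beq_iff_eq, PySem.Int.mod_eq_zero_iff_dvd, dvd_neg]
  have h9 : (PySem.Int.mod (-j) 9 == 0) = (PySem.Int.mod j 9 == 0) := by
    rw [Bool.eq_iff_iff]
    simp only [beq_iff_eq, PySem.Int.mod_eq_zero_iff_dvd, dvd_neg]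
  simp only [pvCondA]
  rw [h12, h9]
  have := pv_has5_neg j hj
  simp only [pvHas5] at this
  rw [this]

lemma pv_neg_reindex (n : Int) (hn : n ≤ 0) :
    (PySem.List.pyRange (n+1) 0 1).countP pvCondA
      = (PySem.List.pyRange 1 (-n) 1).countP pvCondA := by
  rw [PySem.List.pyRange_one (n+1) 0, PySem.List.pyRange_one 1 (-n),
    List.countP_map, List.countP_map]
  have hN : (0 - (n+1)).toNat = (-n - 1).toNat := by omega
  rw [hN]
  set N := (-n - 1).toNat with hNdef
  have hperm : (List.map (fun i => N-1-i) (List.range N)).Perm (List.range N) := by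
    refine (List.perm_ext_iff_of_nodup ?_ List.nodup_range).mpr ?_
    · refine List.Nodup.map_on ?_ List.nodup_range
      intro a ha b hb hab
      simp only [List.mem_range] at ha hb
      omega
    · intro x
      simp only [List.mem_map, List.mem_range]
      constructor
      · rintro ⟨i, hi, rfl⟩; omega
      · intro hx; exact ⟨N-1-x, by omega, by omega⟩
  calc List.countP (pvCondA ∘ fun k : Nat => (n+1) + (k:Int)) (List.range N)
      = List.countP (pvCondA ∘ fun k : Nat => (1:Int) + (k:Int)) (List.map (fun i => N-1-i) (List.range N)) := by
        rw [List.countP_map]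
        refine List.countP_congr ?_
        intro k hk
        simp only [List.mem_range] at hk
        have h1 : ((1:Int) + ((N-1-k : Nat) : Int)) = -((n+1) + (k:Int)) := by omega
        simp only [Function.comp_apply, h1]
        have h2 := pv_condA_neg (-((n+1) + (k:Int))) (by omega)
        simp only [neg_neg] at h2
        rw [h2]
    _ = List.countP (pvCondA ∘ fun k : Nat => (1:Int) + (k:Int)) (List.range N) := hperm.countP_eq _

-- counting over range(1, m) equals B's inclusion–exclusion
lemma pv_main (m : Int) :
    ((PySem.List.pyRange 1 m 1).countP pvCondA : Int)
      = ((PySem.List.pyRange 9 m 9).countP pvHas5 : Int)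
        + ((PySem.List.pyRange 12 m 12).countP pvHas5 : Int)
        - ((PySem.List.pyRange 36 m 36).countP pvHas5 : Int) := by
  have h : ∀ d : Int, 0 < d →
      (PySem.List.pyRange d m d).countP pvHas5
        = (PySem.List.pyRange 1 m 1).countP (fun i => pvHas5 i && decide (d ∣ i)) := by
    intro d hd
    rw [← pv_filter_dvd d m hd, List.countP_filter]
  rw [h 9 (by omega), h 12 (by omega), h 36 (by omega), pv_countP_ie]

-- ===== VERDICT (by name: the statement is the Claim_ definition above) =====
theorem five_nine_twelve_spec : Claim_equal_five_nine_twelve := by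
  intro n _
  unfold Spec_five_nine_twelve five_nine_twelve five_nine_twelve_alt
  simp only [PySem.List.foldl_count_if]
  split_ifs with h
  · have : ((n.natAbs : Int)) = n := by omega
    rw [this, pv_main n]
    ring
  · have : ((n.natAbs : Int)) = -n := by omega
    rw [this, ← pv_main (-n), pv_neg_reindex n (by omega)]
    ring
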